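-- pv_equiv track=rewrite | github.com/dock108dev/sports-data-admin-util | api/app/services/chapters/boundary_rules.py | resolve_boundary_precedence
-- ===== SOURCE A (Python) =====
-- from enum import Enum
--
-- class BoundaryReasonCode(str, Enum):
--     """Fixed enum of reason codes explaining chapter boundaries.
--
--     These codes are diagnostic, not narrative. They explain WHY a boundary
--     exists for debugging, tuning, and validation.
--
--     Multiple reason codes may exist per chapter (e.g., PERIOD_START + TIMEOUT).
--     Reason codes must be deterministic.
--
--     NBA v1 Reason Codes (Issue 0.3):
--     """
--
--     # Hard boundaries (always break)
--     PERIOD_START = "PERIOD_START"          # Start of quarter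
--     PERIOD_END = "PERIOD_END"              # End of quarter
--     OVERTIME_START = "OVERTIME_START"      # Start of overtime
--     GAME_END = "GAME_END"                  # End of game
--
--     # Scene reset boundaries (usually break)
--     TIMEOUT = "TIMEOUT"                    # Team timeout or official timeout
--     REVIEW = "REVIEW"                      # Instant replay review or challenge
--
--     # Momentum boundaries (conditional, minimal v1)
--     RUN_START = "RUN_START"                # A scoring run begins
--     RUN_END_RESPONSE = "RUN_END_RESPONSE"  # Run ends and opponent responds
--     CRUNCH_START = "CRUNCH_START"          # Transition into crunch time
--
-- BOUNDARY_PRECEDENCE = {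
--     # Hard boundaries (highest precedence)
--     BoundaryReasonCode.PERIOD_START: 100,
--     BoundaryReasonCode.OVERTIME_START: 95,
--     BoundaryReasonCode.PERIOD_END: 90,
--     BoundaryReasonCode.GAME_END: 85,
--
--     # Scene reset boundaries (medium precedence)
--     BoundaryReasonCode.REVIEW: 60,
--     BoundaryReasonCode.TIMEOUT: 50,
--
--     # Momentum boundaries (low precedence)
--     BoundaryReasonCode.CRUNCH_START: 20,
--     BoundaryReasonCode.RUN_START: 15,
--     BoundaryReasonCode.RUN_END_RESPONSE: 10,
-- }
--
-- def resolve_boundary_precedence(reason_codes: list[BoundaryReasonCode]) -> list[BoundaryReasonCode]: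
--     """Resolve precedence when multiple boundary triggers occur.
--
--     PRECEDENCE RULES:
--     - Period boundary > timeout > run logic
--     - Timeout immediately following period start does not create new chapter
--     - Multiple triggers are deduplicated by precedence
--
--     Args:
--         reason_codes: List of triggered reason codes
--
--     Returns:
--         Deduplicated list of reason codes in precedence order
--     """
--     if not reason_codes:
--         return []
--
--     # Sort by precedence (highest first)
--     sorted_codes = sorted(
--         reason_codes,
--         key=lambda code: BOUNDARY_PRECEDENCE.get(code, 0),
--         reverse=True
--     )
--
--     # Deduplication rules
--     result = []
--     has_period_boundary = False
--
--     for code in sorted_codes: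
--         # Check if this is a period boundary
--         if code in (BoundaryReasonCode.PERIOD_START, BoundaryReasonCode.PERIOD_END,
--                     BoundaryReasonCode.OVERTIME_START, BoundaryReasonCode.GAME_END):
--             has_period_boundary = True
--             result.append(code)
--
--         # Skip timeout/review if we have a period boundary
--         elif code in (BoundaryReasonCode.TIMEOUT, BoundaryReasonCode.REVIEW):
--             if not has_period_boundary:
--                 result.append(code)
--
--         # Include momentum boundaries unless overridden
--         else:
--             result.append(code)
--
--     return result
-- ===== SOURCE B (Python) =====
-- BOUNDARY_PRECEDENCE = {
--     "PERIOD_START": 100,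
--     "OVERTIME_START": 95,
--     "PERIOD_END": 90,
--     "GAME_END": 85,
--     "REVIEW": 60,
--     "TIMEOUT": 50,
--     "CRUNCH_START": 20,
--     "RUN_START": 15,
--     "RUN_END_RESPONSE": 10,
-- }
--
-- PERIOD_CODES = {"PERIOD_START", "PERIOD_END", "OVERTIME_START", "GAME_END"}
-- SCENE_CODES = {"TIMEOUT", "REVIEW"}
--
-- def resolve_boundary_precedence(reason_codes):
--     has_period = any(code in PERIOD_CODES for code in reason_codes)
--     kept = [code for code in reason_codes
--             if not (has_period and code in SCENE_CODES)]
--     return sorted(kept, key=lambda code: BOUNDARY_PRECEDENCE.get(code, 0),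
--                   reverse=True)
-- ===== Notes on version B (the rewrite author's own statement) =====
-- stated objective: faster
-- what changed: A sorts the whole list first and then scans it with a running has_period flag that decides whether to drop TIMEOUT/REVIEW; B scans the unsorted input once for a period boundary, filters TIMEOUT/REVIEW out up front when one is present, and sorts last - equivalence rests on the stable sort commuting with the filter.
import Mathlib
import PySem

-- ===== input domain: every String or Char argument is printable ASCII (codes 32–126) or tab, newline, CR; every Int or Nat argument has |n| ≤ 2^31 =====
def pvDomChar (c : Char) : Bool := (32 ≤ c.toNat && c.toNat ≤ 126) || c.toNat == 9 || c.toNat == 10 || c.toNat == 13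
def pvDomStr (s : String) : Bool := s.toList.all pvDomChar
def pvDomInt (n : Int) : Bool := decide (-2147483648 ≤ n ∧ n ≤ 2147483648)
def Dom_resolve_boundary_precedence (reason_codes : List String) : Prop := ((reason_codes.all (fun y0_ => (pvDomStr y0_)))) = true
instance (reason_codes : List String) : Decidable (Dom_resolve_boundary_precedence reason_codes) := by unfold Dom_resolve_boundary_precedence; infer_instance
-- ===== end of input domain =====

-- B inverts A's order: A sorts then scans with a running has_period flag; B computes the flag on
-- the raw input, filters TIMEOUT/REVIEW first, and sorts last (objective: alternative decomposition).

-- ===== PORT A =====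
-- BOUNDARY_PRECEDENCE (string-enum keys behave as their string values)
def pvBoundaryPrecedence : PySem.Dict String Int :=
  PySem.Dict.ofList
    [("PERIOD_START", 100), ("OVERTIME_START", 95), ("PERIOD_END", 90), ("GAME_END", 85),
     ("REVIEW", 60), ("TIMEOUT", 50),
     ("CRUNCH_START", 20), ("RUN_START", 15), ("RUN_END_RESPONSE", 10)]

def resolve_boundary_precedence (reason_codes : List String) : List String :=
  if reason_codes = [] then []
  else
    let sorted_codes :=
      PySem.List.sorted reason_codes (fun code => PySem.Dict.getD pvBoundaryPrecedence code 0) true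
    let fin := sorted_codes.foldl
      (fun (st : List String × Bool) code =>
        if code = "PERIOD_START" ∨ code = "PERIOD_END" ∨
           code = "OVERTIME_START" ∨ code = "GAME_END" then
          (st.1 ++ [code], true)
        else if code = "TIMEOUT" ∨ code = "REVIEW" then
          (if st.2 = false then st.1 ++ [code] else st.1, st.2)
        else
          (st.1 ++ [code], st.2))
      ([], false)
    fin.1

-- ===== PORT B =====
-- Source B's module constants (its own dict/sets of plain strings)
def pvAltPrecedence : PySem.Dict String Int :=
  PySem.Dict.ofList
    [("PERIOD_START", 100), ("OVERTIME_START", 95), ("PERIOD_END", 90), ("GAME_END", 85),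
     ("REVIEW", 60), ("TIMEOUT", 50),
     ("CRUNCH_START", 20), ("RUN_START", 15), ("RUN_END_RESPONSE", 10)]

def pvPeriodCodes : PySem.Set String :=
  PySem.Set.ofList ["PERIOD_START", "PERIOD_END", "OVERTIME_START", "GAME_END"]

def pvSceneCodes : PySem.Set String :=
  PySem.Set.ofList ["TIMEOUT", "REVIEW"]

def resolve_boundary_precedence_alt (reason_codes : List String) : List String :=
  let has_period := reason_codes.any (fun code => pvPeriodCodes.contains code)
  let kept := reason_codes.filter (fun code => !(has_period && pvSceneCodes.contains code))
  PySem.List.sorted kept (fun code => PySem.Dict.getD pvAltPrecedence code 0) true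

-- ===== PRECONDITION & SPEC =====
def Spec_resolve_boundary_precedence (reason_codes : List String) (out : List String) : Prop := out = resolve_boundary_precedence_alt reason_codes
instance (reason_codes : List String) (out : List String) : Decidable (Spec_resolve_boundary_precedence reason_codes out) := by unfold Spec_resolve_boundary_precedence; infer_instance

-- ===== CLAIM (what is proved, stated in full; the proofs are below) =====
def Claim_equal_resolve_boundary_precedence : Prop := ∀ (reason_codes : List String), Dom_resolve_boundary_precedence reason_codes → Spec_resolve_boundary_precedence reason_codes (resolve_boundary_precedence reason_codes)

-- ===== LEMMAS AND PROOFS =====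

-- the two precedence tables are the same association list
theorem pv_dict_eq : pvBoundaryPrecedence = pvAltPrecedence := rfl

-- abbreviations used only by the proofs
def pvKey (c : String) : Int := PySem.Dict.getD pvAltPrecedence c 0

def pvIsPeriod (c : String) : Bool :=
  c = "PERIOD_START" ∨ c = "PERIOD_END" ∨ c = "OVERTIME_START" ∨ c = "GAME_END"

def pvIsScene (c : String) : Bool := c = "TIMEOUT" ∨ c = "REVIEW"

def pvStep (st : List String × Bool) (code : String) : List String × Bool :=
  if code = "PERIOD_START" ∨ code = "PERIOD_END" ∨
     code = "OVERTIME_START" ∨ code = "GAME_END" then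
    (st.1 ++ [code], true)
  else if code = "TIMEOUT" ∨ code = "REVIEW" then
    (if st.2 = false then st.1 ++ [code] else st.1, st.2)
  else
    (st.1 ++ [code], st.2)

theorem pv_period_key (c : String) (h : pvIsPeriod c = true) : 85 ≤ pvKey c := by
  simp only [pvIsPeriod, decide_eq_true_eq] at h
  rcases h with h | h | h | h <;> subst h <;> decide

theorem pv_scene_key (c : String) (h : pvIsScene c = true) : pvKey c ≤ 60 := by
  simp only [pvIsScene, decide_eq_true_eq] at h
  rcases h with h | h <;> subst h <;> decide

theorem pv_period_not_scene (c : String) (h : pvIsPeriod c = true) : pvIsScene c = false := by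
  simp only [pvIsPeriod, decide_eq_true_eq] at h
  rcases h with h | h | h | h <;> subst h <;> decide

-- once the flag is set, the scan keeps exactly the non-scene codes
theorem pv_fold_flag_true (S : List String) (res : List String) :
    (S.foldl pvStep (res, true)).1 = res ++ S.filter (fun c => !(pvIsScene c)) := by
  induction S generalizing res with
  | nil => simp
  | cons c S ih =>
    simp only [List.foldl_cons, List.filter_cons, pvStep]
    by_cases hp : (c = "PERIOD_START" ∨ c = "PERIOD_END" ∨ c = "OVERTIME_START" ∨ c = "GAME_END")
    · have hs : pvIsScene c = false := pv_period_not_scene c (by simp [pvIsPeriod, hp])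
      simp [hp, ih, hs, List.append_assoc]
    · by_cases ht : (c = "TIMEOUT" ∨ c = "REVIEW")
      · have hs : pvIsScene c = true := by simp [pvIsScene, ht]
        simp [hp, ht, ih, hs]
      · have hs : pvIsScene c = false := by simp [pvIsScene]; tauto
        simp [hp, ht, ih, hs, List.append_assoc]

-- with the flag still unset, on a key-descending list the scan computes B's filter
theorem pv_fold_sorted (S : List String)
    (hs : S.Pairwise (fun a b => pvKey b ≤ pvKey a)) (res : List String) :
    (S.foldl pvStep (res, false)).1
      = res ++ S.filter (fun c => !(S.any pvIsPeriod && pvIsScene c)) := by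
  induction S generalizing res with
  | nil => simp
  | cons c S ih =>
    have htail := hs.tail
    have hhead : ∀ y ∈ S, pvKey y ≤ pvKey c := by
      intro y hy; exact (List.pairwise_cons.mp hs).1 y hy
    simp only [List.foldl_cons, pvStep]
    by_cases hp : (c = "PERIOD_START" ∨ c = "PERIOD_END" ∨ c = "OVERTIME_START" ∨ c = "GAME_END")
    · have hpc : pvIsPeriod c = true := by simp [pvIsPeriod, hp]
      have hsc : pvIsScene c = false := pv_period_not_scene c hpc
      have hany : (c :: S).any pvIsPeriod = true := by simp [hpc]
      simp only [hp, if_true, pv_fold_flag_true, hany, List.filter_cons, hsc]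
      simp [List.append_assoc]
    · have hpc : pvIsPeriod c = false := by
        simp only [pvIsPeriod, decide_eq_false_iff_not]; exact hp
      by_cases ht : (c = "TIMEOUT" ∨ c = "REVIEW")
      · -- a scene code with the flag unset: no period code can follow it in sorted order
        have hsc : pvIsScene c = true := by simp [pvIsScene, ht]
        have hnp : S.any pvIsPeriod = false := by
          by_contra h
          rcases List.any_eq_true.mp (Bool.of_not_eq_false h) with ⟨y, hy, hyp⟩
          have h1 := pv_period_key y hyp
          have h2 := pv_scene_key c hsc
          have h3 := hhead y hy
          omega
        have hany : (c :: S).any pvIsPeriod = false := by simp [hpc, hnp]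
        simp only [ht, hp, if_false, if_true, hany]
        rw [ih htail]
        simp [hnp, List.append_assoc]
      · have hsc : pvIsScene c = false := by
          simp only [pvIsScene, decide_eq_false_iff_not]; exact ht
        have hany : (c :: S).any pvIsPeriod = S.any pvIsPeriod := by simp [hpc]
        simp only [hp, ht, if_false]
        rw [ih htail]
        simp [hany, hsc, List.append_assoc]

-- a stable (insertion) sort commutes with filtering
theorem pv_insertBy_pairwise {κ : Type} [LinearOrder κ] (key : String → κ)
    (x : String) (acc : List String)
    (h : acc.Pairwise (fun a b => key b ≤ key a)) :
    (PySem.List.insertBy (fun a b => decide (key b < key a)) x acc).Pairwise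
      (fun a b => key b ≤ key a) := by
  induction acc with
  | nil => simp [PySem.List.insertBy]
  | cons y ys ih =>
    rw [List.pairwise_cons] at h
    obtain ⟨hy, hys⟩ := h
    by_cases hxy : key y < key x
    · simp only [PySem.List.insertBy, hxy, decide_true, if_true]
      refine List.pairwise_cons.mpr ⟨?_, List.pairwise_cons.mpr ⟨hy, hys⟩⟩
      intro z hz
      rcases List.mem_cons.mp hz with h | h
      · subst h; exact le_of_lt hxy
      · exact le_trans (hy z h) (le_of_lt hxy)
    · simp only [PySem.List.insertBy, hxy, decide_false, if_false]
      refine List.pairwise_cons.mpr ⟨?_, ih hys⟩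
      intro z hz
      rcases (PySem.List.mem_insertBy _ x z ys).mp hz with h | h
      · subst h; exact le_of_not_gt hxy
      · exact hy z h
    
theorem pv_filter_insertBy {κ : Type} [LinearOrder κ] (key : String → κ)
    (p : String → Bool) (x : String) (acc : List String)
    (h : acc.Pairwise (fun a b => key b ≤ key a)) :
    (PySem.List.insertBy (fun a b => decide (key b < key a)) x acc).filter p
      = if p x then PySem.List.insertBy (fun a b => decide (key b < key a)) x (acc.filter p)
        else acc.filter p := by
  induction acc with
  | nil => by_cases hx : p x <;> simp [PySem.List.insertBy, List.filter, hx]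
  | cons y ys ih =>
    rw [List.pairwise_cons] at h
    obtain ⟨hy, hys⟩ := h
    by_cases hxy : key y < key x
    · simp only [PySem.List.insertBy, hxy, decide_true, if_true]
      by_cases hpx : p x
      · by_cases hpy : p y
        · simp [List.filter_cons, hpx, hpy, PySem.List.insertBy, hxy]
        · simp only [List.filter_cons, hpx, hpy, if_true, if_false, hxy]
          -- x goes to the front of filter ys too: every kept element has key < key x
          cases hf : ys.filter p with
          | nil => simp [PySem.List.insertBy]
          | cons z zs =>
            have hz : z ∈ ys := List.mem_of_mem_filter (hf ▸ List.mem_cons_self ..)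
            have : key z < key x := lt_of_le_of_lt (hy z hz) hxy
            simp [PySem.List.insertBy, this]
      · by_cases hpy : p y <;> simp [List.filter_cons, hpx, hpy]
    · simp only [PySem.List.insertBy, hxy, decide_false, if_false]
      by_cases hpx : p x
      · by_cases hpy : p y
        · simp [List.filter_cons, hpy, ih hys, hpx, PySem.List.insertBy, hxy]
        · simp [List.filter_cons, hpy, ih hys, hpx]
      · by_cases hpy : p y <;> simp [List.filter_cons, hpy, ih hys, hpx]

theorem pv_filter_foldl_insertBy {κ : Type} [LinearOrder κ] (key : String → κ)
    (p : String → Bool) (xs acc : List String)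
    (h : acc.Pairwise (fun a b => key b ≤ key a)) :
    (xs.foldl (fun acc x => PySem.List.insertBy (fun a b => decide (key b < key a)) x acc) acc).filter p
      = (xs.filter p).foldl
          (fun acc x => PySem.List.insertBy (fun a b => decide (key b < key a)) x acc)
          (acc.filter p) := by
  induction xs generalizing acc with
  | nil => simp
  | cons x xs ih =>
    simp only [List.foldl_cons, List.filter_cons]
    rw [ih _ (pv_insertBy_pairwise key x acc h), pv_filter_insertBy key p x acc h]
    by_cases hpx : p x <;> simp [hpx]

theorem pv_filter_sorted {κ : Type} [LinearOrder κ] (key : String → κ)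
    (p : String → Bool) (xs : List String) :
    (PySem.List.sorted xs key true).filter p = PySem.List.sorted (xs.filter p) key true := by
  rw [PySem.List.sorted_rev_eq_foldl_insertBy, PySem.List.sorted_rev_eq_foldl_insertBy]
  simpa using pv_filter_foldl_insertBy key p xs [] (by simp)

theorem pv_any_sorted (xs : List String) (p : String → Bool) :
    (PySem.List.sorted xs pvKey true).any p = xs.any p := by
  rw [Bool.eq_iff_iff]
  simp only [List.any_eq_true]
  constructor
  · rintro ⟨y, hy, hp⟩; exact ⟨y, (PySem.List.mem_sorted xs pvKey true y).mp hy, hp⟩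
  · rintro ⟨y, hy, hp⟩; exact ⟨y, (PySem.List.mem_sorted xs pvKey true y).mpr hy, hp⟩

theorem pv_contains_period (c : String) :
    pvPeriodCodes.contains c = pvIsPeriod c := by
  simp [pvPeriodCodes, pvIsPeriod, PySem.Set.contains, List.contains_eq_mem, PySem.Set.mem_ofList]

theorem pv_contains_scene (c : String) :
    pvSceneCodes.contains c = pvIsScene c := by
  simp [pvSceneCodes, pvIsScene, PySem.Set.contains, List.contains_eq_mem, PySem.Set.mem_ofList]

-- ===== VERDICT (by name: the statement is the Claim_ definition above) =====
theorem resolve_boundary_precedence_spec : Claim_equal_resolve_boundary_precedence := by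
  intro xs _
  unfold Spec_resolve_boundary_precedence resolve_boundary_precedence resolve_boundary_precedence_alt
  by_cases hnil : xs = []
  · subst hnil; simp [PySem.List.sorted]
  · simp only [hnil, if_false]
    have hkey : (fun code => PySem.Dict.getD pvBoundaryPrecedence code 0) = pvKey := by
      funext c; rw [pv_dict_eq]; rfl
    have hkey' : (fun code => PySem.Dict.getD pvAltPrecedence code 0) = pvKey := rfl
    rw [hkey, hkey']
    have hsorted := PySem.List.sorted_pairwise_rev xs pvKey
    have hfold := pv_fold_sorted (PySem.List.sorted xs pvKey true) hsorted []
    have hP : (fun c => pvPeriodCodes.contains c) = pvIsPeriod := funext pv_contains_period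
    have hS : (fun c => pvSceneCodes.contains c) = pvIsScene := funext pv_contains_scene
    show ((PySem.List.sorted xs pvKey true).foldl pvStep ([], false)).1
        = PySem.List.sorted
            (xs.filter fun code =>
              !((xs.any fun c => pvPeriodCodes.contains c) && pvSceneCodes.contains code))
            pvKey true
    rw [hfold, List.nil_append, pv_filter_sorted]
    congr 1
    simp only [hP, hS, pv_any_sorted]
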